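-- pv_equiv track=rewrite | github.com/earnestt1234/seedir | seedir/seedir.py | get_base_header
-- ===== SOURCE A (Python) =====
-- def get_base_header(incomplete, extend, space):
--     '''
--     For seedir.seedir(), generate the combination of extend and space
--     tokens to prepend to file names when generating folder diagrams.
--     See the documentation for seedir.seedir() for an
--     explanation of these tokens.
--
--     The string generated here will still be missing the branch token
--     (split or final) as well as any folderstart or filestart tokens.
--     They are added within seedir.seedir().
--
--     For any item included in a folder diagram, the combination of
--     extend and space tokens is based on the depth of the item as well as the
--     parent folders to that item which are not completed.  This information
--     is symbolized with the `incomplete` argument.  The following illustrates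
--     the incomplete arguments passed to this function for an example folder
--     tree:
--
--         >>> #
--
--         doc/
--         ├─_static/                  [0]
--         │ ├─embedded/               [0, 1]
--         │ │ ├─deep_file             [0, 1, 2]
--         │ │ └─very/                 [0, 1, 2]
--         │ │   └─deep/               [0, 1, 3]
--         │ │     └─folder/           [0, 1, 4]
--         │ │       └─very_deep_file  [0, 1, 5]
--         │ └─less_deep_file          [0, 1]
--         └─index.rst                 [0]
--
--     Parameters
--     ----------
--     incomplete : list-like
--         List of integers denoting the depth of incomplete folders at the time
--         of constructing the line for a given item.  Zero represents being
--         inside the main folder, with increasing integers meaing increasing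
--         depth.
--     extend : str
--         Characters symbolizing the extension of a folder.
--     space : str
--         Characters providing the gap between items and earlier parents.
--
--     Returns
--     -------
--     str
--         Base header string.
--
--     '''
--     base_header = []
--     max_i = max(incomplete)
--     for p in range(max_i):
--         if p in incomplete:
--             base_header.append(extend)
--         else:
--             base_header.append(space)
--     return "".join(base_header)
-- ===== SOURCE B (Python) =====
-- def get_base_header(incomplete, extend, space):
--     max_i = max(incomplete)
--     parts = []
--     prev = 0
--     for p in sorted(set(incomplete)):
--         if 0 <= p < max_i:
--             parts.extend([space] * (p - prev))
--             parts.append(extend)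
--             prev = p + 1
--     parts.extend([space] * (max_i - prev))
--     return "".join(parts)
-- ===== Notes on version B (the rewrite author's own statement) =====
-- stated objective: alternative
-- what changed: Instead of scanning every position in range(max) and testing membership per position, B sorts the deduplicated depths once and emits runs of space between consecutive listed depths (gap filling), removing the inner membership scan.
import Mathlib
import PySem

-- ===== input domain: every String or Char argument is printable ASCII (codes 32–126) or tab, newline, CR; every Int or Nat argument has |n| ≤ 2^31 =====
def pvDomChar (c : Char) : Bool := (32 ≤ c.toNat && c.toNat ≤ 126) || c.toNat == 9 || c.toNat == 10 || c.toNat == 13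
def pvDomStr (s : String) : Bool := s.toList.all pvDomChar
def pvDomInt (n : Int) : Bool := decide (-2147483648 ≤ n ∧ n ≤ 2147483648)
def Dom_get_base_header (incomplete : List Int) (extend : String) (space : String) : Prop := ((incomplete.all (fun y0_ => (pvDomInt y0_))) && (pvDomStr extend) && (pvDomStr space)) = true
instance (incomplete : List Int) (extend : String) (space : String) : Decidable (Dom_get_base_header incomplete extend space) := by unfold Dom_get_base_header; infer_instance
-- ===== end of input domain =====

-- B replaces A's per-position membership scan over range(max) by sorting the deduplicated
-- depths once and emitting runs of space between consecutive listed depths (gap filling).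


-- ===== PORT A =====
def get_base_header (incomplete : List Int) (extend : String) (space : String) : String :=
  -- max(incomplete): raises ValueError on []; excluded by Pre_, .getD 0 is never reached there
  let max_i : Int := (PySem.List.max? incomplete (fun y => y)).getD 0
  let base_header :=
    (PySem.List.pyRange 0 max_i 1).foldl
      (fun acc p => if incomplete.contains p then acc ++ [extend] else acc ++ [space]) []
  PySem.Str.join "" base_header

-- ===== PORT B =====
def get_base_header_alt (incomplete : List Int) (extend : String) (space : String) : String :=
  let max_i : Int := (PySem.List.max? incomplete (fun y => y)).getD 0
  -- for p in sorted(set(incomplete)): if 0 <= p < max_i: emit the gap of spaces, then extend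
  let r :=
    (PySem.List.sorted (PySem.Set.ofList incomplete) (fun x => x) false).foldl
      (fun (s : List String × Int) p =>
        if 0 ≤ p ∧ p < max_i then
          (s.1 ++ PySem.List.pyRepeat [space] (p - s.2) ++ [extend], p + 1)
        else s)
      ([], 0)
  PySem.Str.join "" (r.1 ++ PySem.List.pyRepeat [space] (max_i - r.2))

-- ===== PRECONDITION & SPEC =====
-- Pre_ excludes only the empty list, on which Python's max() (in A and B alike) raises ValueError.
def Pre_get_base_header (incomplete : List Int) (extend : String) (space : String) : Prop := incomplete ≠ []
instance (incomplete : List Int) (extend : String) (space : String) : Decidable (Pre_get_base_header incomplete extend space) := by unfold Pre_get_base_header; infer_instance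
def pvWitness_get_base_header : List Int × String × String := ([0, 1, 3], "| ", "  ")
def Spec_get_base_header (incomplete : List Int) (extend : String) (space : String) (out : String) : Prop := out = get_base_header_alt incomplete extend space
instance (incomplete : List Int) (extend : String) (space : String) (out : String) : Decidable (Spec_get_base_header incomplete extend space out) := by unfold Spec_get_base_header; infer_instance

-- ===== CLAIM (what is proved, stated in full; the proofs are below) =====
def Claim_equal_get_base_header : Prop := ∀ (incomplete : List Int) (extend : String) (space : String), Dom_get_base_header incomplete extend space → Pre_get_base_header incomplete extend space → Spec_get_base_header incomplete extend space (get_base_header incomplete extend space)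

-- ===== LEMMAS AND PROOFS =====

-- a run of the position-wise tokens over a range none of whose positions is listed is a run of spaces
theorem pv_run_space (incomplete : List Int) (extend space : String) (a b : Int)
    (h : ∀ p, a ≤ p → p < b → ¬ (incomplete.contains p = true)) :
    (PySem.List.pyRange a b 1).map
        (fun p => if incomplete.contains p then extend else space)
      = PySem.List.pyRepeat [space] (b - a) := by
  rw [PySem.List.pyRepeat_singleton]
  have hc : ∀ p ∈ PySem.List.pyRange a b 1,
      (if incomplete.contains p then extend else space) = space := by
    intro p hp
    rw [PySem.List.mem_pyRange_one] at hp
    exact if_neg (by simpa [List.contains_iff_mem] using h p hp.1 hp.2)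
  rw [List.map_congr_left hc, List.map_const', PySem.List.length_pyRange_one]

-- gap-filling invariant for B's guard-free fold (over the filtered, strictly increasing depths)
theorem pv_gap (incomplete : List Int) (extend space : String) (M : Int) :
    ∀ (qs : List Int) (acc : List String) (lo : Int), 0 ≤ lo →
      qs.Pairwise (· < ·) →
      (∀ p ∈ qs, lo ≤ p ∧ p < M) →
      (∀ p, lo ≤ p → p < M → (incomplete.contains p = true ↔ p ∈ qs)) →
      (qs.foldl (fun (s : List String × Int) p =>
          (s.1 ++ PySem.List.pyRepeat [space] (p - s.2) ++ [extend], p + 1)) (acc, lo)).1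
        ++ PySem.List.pyRepeat [space]
            (M - (qs.foldl (fun (s : List String × Int) p =>
              (s.1 ++ PySem.List.pyRepeat [space] (p - s.2) ++ [extend], p + 1)) (acc, lo)).2)
      = acc ++ (PySem.List.pyRange lo M 1).map
          (fun p => if incomplete.contains p then extend else space)
  | [], acc, lo, _, _, _, hmem => by
      simp only [List.foldl_nil]
      rw [pv_run_space incomplete extend space lo M
        (fun p h1 h2 hc => by simpa using (hmem p h1 h2).mp hc)]
  | q :: t, acc, lo, hlo, hpw, hbnd, hmem => by
      obtain ⟨hq1, hq2⟩ := hbnd q (List.mem_cons_self ..)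
      have hqt := (List.pairwise_cons.mp hpw).1
      simp only [List.foldl_cons]
      rw [pv_gap incomplete extend space M t
            (acc ++ PySem.List.pyRepeat [space] (q - lo) ++ [extend]) (q + 1)
            (by omega)
            (List.pairwise_cons.mp hpw).2
            (fun p hp => ⟨by have := hqt p hp; omega, (hbnd p (List.mem_cons_of_mem _ hp)).2⟩)
            (fun p h1 h2 => by
              rw [hmem p (by omega) h2, List.mem_cons]
              constructor
              · rintro (rfl | h) <;> [omega; exact h]
              · exact Or.inr)]
      rw [PySem.List.pyRange_one_append lo q M hq1 (by omega),
          PySem.List.pyRange_one_cons hq2, List.map_append, List.map_cons]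
      rw [pv_run_space incomplete extend space lo q
        (fun p h1 h2 hc => by
          rcases List.mem_cons.mp ((hmem p h1 (by omega)).mp hc) with hpq | h
          · omega
          · exact absurd (hqt p h) (by omega))]
      have hqm : incomplete.contains q = true := (hmem q hq1 hq2).mpr (List.mem_cons_self ..)
      simp only [hqm, if_true]
      simp [List.append_assoc]

-- ===== VERDICT (by name: the statement is the Claim_ definition above) =====
theorem get_base_header_spec : Claim_equal_get_base_header := by
  intro incomplete extend space _ _
  unfold Spec_get_base_header get_base_header get_base_header_alt
  set M : Int := (PySem.List.max? incomplete (fun y => y)).getD 0 with hM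
  apply congrArg (PySem.Str.join "")
  -- A's loop is the map over the range
  have hf : (fun (acc : List String) p =>
      if incomplete.contains p then acc ++ [extend] else acc ++ [space])
      = (fun acc p => acc ++ [if incomplete.contains p then extend else space]) := by
    funext acc p; split_ifs <;> rfl
  rw [hf]
  have hA := PySem.List.foldl_append_singleton_eq_map
    (f := fun p => if incomplete.contains p then extend else space)
    (l := PySem.List.pyRange 0 M 1) (acc := ([] : List String))
  rw [List.nil_append] at hA
  rw [hA]
  -- B's guarded fold is the guard-free fold over the filtered sorted set
  rw [PySem.List.foldl_ite_eq_foldl_filter (p := fun p => 0 ≤ p ∧ p < M)]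
  set qs := (PySem.List.sorted (PySem.Set.ofList incomplete) (fun x => x) false).filter
      (fun p => decide (0 ≤ p ∧ p < M)) with hqs
  rw [pv_gap incomplete extend space M qs [] 0 le_rfl
      (List.Pairwise.filter _ (PySem.List.sorted_ofList_pairwise_lt incomplete))
      (fun p hp => by
        rw [hqs, List.mem_filter] at hp
        exact ⟨(of_decide_eq_true hp.2).1, (of_decide_eq_true hp.2).2⟩)
      (fun p h1 h2 => by
        rw [hqs, List.mem_filter, PySem.List.mem_sorted, PySem.Set.mem_ofList]
        constructor
        · intro hc
          exact ⟨(List.contains_iff_mem ..).mp hc, by simp [h1, h2]⟩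
        · intro ⟨h, _⟩
          exact (List.contains_iff_mem ..).mpr h)]
  rw [List.nil_append]
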